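-- pv_equiv track=rewrite | github.com/kalchikee/kalchi-picks | picks.py | _get_h2h
-- ===== SOURCE A (Python) =====
-- def _get_h2h(rows: list, player_a: str, player_b: str, surface: str) -> tuple[int, int]:
--     """Returns (a_wins, total) for head-to-head on this surface. Falls back to all surfaces if <3."""
--     def _h2h_filter(r, surf=None):
--         involved = {r.get("winner_name"), r.get("loser_name")} == {player_a, player_b}
--         if not involved:
--             return False
--         if surf:
--             return r.get("surface") == surf
--         return True
--
--     surf_matches = [r for r in rows if _h2h_filter(r, surface)]
--     if len(surf_matches) < 3:
--         surf_matches = [r for r in rows if _h2h_filter(r)]  # all surfaces fallback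
--
--     total = len(surf_matches)
--     a_wins = sum(1 for r in surf_matches if r.get("winner_name") == player_a)
--     return a_wins, total
-- ===== SOURCE B (Python) =====
-- def _get_h2h(rows: list, player_a: str, player_b: str, surface: str) -> tuple[int, int]:
--     """Single pass over rows keeping four counters; pick surface counts if >= 3, else all-surface counts."""
--     surf_a_wins = surf_total = all_a_wins = all_total = 0
--     for r in rows:
--         if {r.get("winner_name"), r.get("loser_name")} != {player_a, player_b}:
--             continue
--         a_won = r.get("winner_name") == player_a
--         all_total += 1
--         if a_won:
--             all_a_wins += 1
--         if (not surface) or r.get("surface") == surface: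
--             surf_total += 1
--             if a_won:
--                 surf_a_wins += 1
--     if surf_total >= 3:
--         return surf_a_wins, surf_total
--     return all_a_wins, all_total
-- ===== Notes on version B (the rewrite author's own statement) =====
-- stated objective: simpler
-- what changed: Replaces A's two list-comprehension passes (plus a possible third fallback pass and a counting pass over the filtered list) with one fold over rows maintaining four integer counters, selecting surface vs all-surface counts at the end.
import Mathlib
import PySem

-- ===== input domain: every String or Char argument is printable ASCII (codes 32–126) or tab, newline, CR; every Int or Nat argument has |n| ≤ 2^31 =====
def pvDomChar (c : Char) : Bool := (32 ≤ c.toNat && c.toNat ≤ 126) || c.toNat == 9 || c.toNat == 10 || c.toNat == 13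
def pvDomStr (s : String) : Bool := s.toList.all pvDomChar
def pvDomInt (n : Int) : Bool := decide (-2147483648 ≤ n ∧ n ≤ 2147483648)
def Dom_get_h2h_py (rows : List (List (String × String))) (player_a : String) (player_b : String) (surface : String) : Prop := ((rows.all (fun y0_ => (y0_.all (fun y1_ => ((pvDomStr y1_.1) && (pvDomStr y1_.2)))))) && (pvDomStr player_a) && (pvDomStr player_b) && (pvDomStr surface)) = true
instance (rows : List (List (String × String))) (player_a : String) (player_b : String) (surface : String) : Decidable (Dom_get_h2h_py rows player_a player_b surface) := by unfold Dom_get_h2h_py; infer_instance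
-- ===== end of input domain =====

-- B replaces A's two/three filtering passes (and a counting pass) by a single fold over `rows`
-- maintaining four integer counters; same return value, chosen for simplicity.

-- shared helper: r.get(k) on an association-list dict (first match, None if absent)
def pvRowGet (r : List (String × String)) (k : String) : Option String :=
  (r.find? (fun p => p.1 == k)).map (·.2)

-- {r.get("winner_name"), r.get("loser_name")} == {player_a, player_b} — exact for these
-- two-element literal sets (incl. player_a == player_b and None values, which never equal a str)
def pvInvolved (r : List (String × String)) (pa pb : String) : Bool :=
  let w := pvRowGet r "winner_name"
  let l := pvRowGet r "loser_name"
  (w == some pa && l == some pb) || (w == some pb && l == some pa)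

-- ===== PORT A =====
-- inner _h2h_filter(r, surf): surf is None or the surface string; `if surf:` is true iff
-- surf is a non-empty string
def h2hFilterA (pa pb : String) (surf : Option String) (r : List (String × String)) : Bool :=
  if !(pvInvolved r pa pb) then false
  else
    match surf with
    | some s => if s.isEmpty then true else pvRowGet r "surface" == some s
    | none => true

def get_h2h_py (rows : List (List (String × String))) (player_a : String) (player_b : String) (surface : String) : Int × Int :=
  let surf_matches := rows.filter (h2hFilterA player_a player_b (some surface))
  let surf_matches := if surf_matches.length < 3 then rows.filter (h2hFilterA player_a player_b none) else surf_matches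
  let total : Int := surf_matches.length
  -- sum(1 for r in surf_matches if r.get("winner_name") == player_a)
  let a_wins : Int := (surf_matches.countP (fun r => pvRowGet r "winner_name" == some player_a) : Nat)
  (a_wins, total)

-- ===== PORT B =====
-- state = (surf_a_wins, surf_total, all_a_wins, all_total)
def altStep (pa pb surface : String) (st : Int × Int × Int × Int) (r : List (String × String)) : Int × Int × Int × Int :=
  if pvInvolved r pa pb then
    let aWon := pvRowGet r "winner_name" == some pa
    match st with
    | (sa, stt, aa, att) =>
      let aa := aa + (if aWon then 1 else 0)
      let att := att + 1
      if surface.isEmpty || pvRowGet r "surface" == some surface then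
        (sa + (if aWon then 1 else 0), stt + 1, aa, att)
      else (sa, stt, aa, att)
  else st

def get_h2h_py_alt (rows : List (List (String × String))) (player_a : String) (player_b : String) (surface : String) : Int × Int :=
  match rows.foldl (altStep player_a player_b surface) (0, 0, 0, 0) with
  | (sa, stt, aa, att) => if stt ≥ 3 then (sa, stt) else (aa, att)

-- ===== PRECONDITION & SPEC =====
def Spec_get_h2h_py (rows : List (List (String × String))) (player_a : String) (player_b : String) (surface : String) (out : Int × Int) : Prop := out = get_h2h_py_alt rows player_a player_b surface
instance (rows : List (List (String × String))) (player_a : String) (player_b : String) (surface : String) (out : Int × Int) : Decidable (Spec_get_h2h_py rows player_a player_b surface out) := by unfold Spec_get_h2h_py; infer_instance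

-- ===== CLAIM (what is proved, stated in full; the proofs are below) =====
def Claim_equal_get_h2h_py : Prop := ∀ (rows : List (List (String × String))) (player_a : String) (player_b : String) (surface : String), Dom_get_h2h_py rows player_a player_b surface → Spec_get_h2h_py rows player_a player_b surface (get_h2h_py rows player_a player_b surface)

-- ===== LEMMAS AND PROOFS =====

-- the all-surfaces filter is exactly the involvement test
theorem h2hFilterA_none (pa pb : String) (r : List (String × String)) :
    h2hFilterA pa pb none r = pvInvolved r pa pb := by
  unfold h2hFilterA; cases pvInvolved r pa pb <;> simp

-- the surface filter = involvement && (falsy surface || surface match)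
theorem h2hFilterA_some (pa pb s : String) (r : List (String × String)) :
    h2hFilterA pa pb (some s) r
      = (pvInvolved r pa pb && (s.isEmpty || pvRowGet r "surface" == some s)) := by
  unfold h2hFilterA
  cases hinv : pvInvolved r pa pb
  · simp
  · cases hs : s.isEmpty <;> simp [hs]

-- fold invariant: the four counters accumulate the four counts
theorem altStep_fold (pa pb surface : String) (rows : List (List (String × String)))
    (sa stt aa att : Int) :
    rows.foldl (altStep pa pb surface) (sa, stt, aa, att)
      = (sa + (rows.countP (fun r => (pvRowGet r "winner_name" == some pa)
              && h2hFilterA pa pb (some surface) r) : Nat),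
         stt + (rows.countP (h2hFilterA pa pb (some surface)) : Nat),
         aa + (rows.countP (fun r => (pvRowGet r "winner_name" == some pa)
              && h2hFilterA pa pb none r) : Nat),
         att + (rows.countP (h2hFilterA pa pb none) : Nat)) := by
  induction rows generalizing sa stt aa att with
  | nil => simp
  | cons r rest ih =>
    simp only [List.foldl_cons, List.countP_cons, ih]
    rw [h2hFilterA_none, h2hFilterA_some]
    unfold altStep
    cases hinv : pvInvolved r pa pb
    · simp
    · cases hw : (pvRowGet r "winner_name" == some pa) <;>
        cases hs : (surface.isEmpty || pvRowGet r "surface" == some surface) <;>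
        · simp [Prod.ext_iff]
          omega

theorem get_h2h_py_spec : Claim_equal_get_h2h_py := by
  intro rows pa pb surface _
  unfold Spec_get_h2h_py get_h2h_py get_h2h_py_alt
  rw [altStep_fold]
  simp only [← List.countP_eq_length_filter, zero_add]
  by_cases h : rows.countP (h2hFilterA pa pb (some surface)) < 3
  · rw [if_pos h, if_neg (show ¬ ((rows.countP (h2hFilterA pa pb (some surface)) : Int) ≥ 3) by
      omega)]
    rw [List.countP_filter, ← List.countP_eq_length_filter]
  · rw [if_neg h, if_pos (show ((rows.countP (h2hFilterA pa pb (some surface)) : Int) ≥ 3) by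
      omega)]
    rw [List.countP_filter, ← List.countP_eq_length_filter]

-- ===== VERDICT (by name: the statement is the Claim_ definition above) =====
-- (get_h2h_py_spec is the verdict theorem, proved above)
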